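-- pv_equiv track=rewrite | github.com/qwo877/apcs-solution | apcs.py/2024 06 04.py | build_d
-- ===== SOURCE A (Python) =====
-- def build_d(arr):
--     idx_lst = []
--     val_lst = []
--     mc = 0
--     for i, s in arr:
--         mc = max(mc, s)
--         idx_lst.append(i)
--         val_lst.append(-mc)
--     idx_lst.reverse()
--     val_lst.reverse()
--     return (idx_lst, val_lst)
-- ===== SOURCE B (Python) =====
-- def build_d(arr):
--     # Record only the breakpoints where the running max increases, then
--     # expand those constant runs back-to-front into the reversed value list.
--     records = []
--     m = 0
--     k = 0
--     for _, s in arr: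
--         if s > m:
--             records.append((k, s))
--             m = s
--         k += 1
--     vals_rev = []
--     end = len(arr)
--     for start, v in reversed(records):
--         vals_rev.extend([-v] * (end - start))
--         end = start
--     vals_rev.extend([0] * end)
--     idx_rev = [i for i, _ in arr]
--     idx_rev.reverse()
--     return (idx_rev, vals_rev)
-- ===== Notes on version B (the rewrite author's own statement) =====
-- stated objective: alternative
-- what changed: Replaces A's per-element running-max append-then-reverse loop with a run-length scheme: one pass records only the breakpoints where the running max increases, then a back-to-front expansion of those constant runs emits the reversed value list directly (no list reversal of the values).
import Mathlib
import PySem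

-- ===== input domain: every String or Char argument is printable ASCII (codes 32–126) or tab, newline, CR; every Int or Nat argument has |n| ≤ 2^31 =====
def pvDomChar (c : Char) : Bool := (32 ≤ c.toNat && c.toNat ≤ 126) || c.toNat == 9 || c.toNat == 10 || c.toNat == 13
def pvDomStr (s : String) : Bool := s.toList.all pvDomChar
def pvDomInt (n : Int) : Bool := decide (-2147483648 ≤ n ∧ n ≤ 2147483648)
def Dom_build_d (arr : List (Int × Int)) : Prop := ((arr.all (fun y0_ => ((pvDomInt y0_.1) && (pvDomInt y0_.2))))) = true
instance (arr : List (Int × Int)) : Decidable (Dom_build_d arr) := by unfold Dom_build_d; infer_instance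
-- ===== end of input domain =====

-- B replaces A's per-element running-max loop by breakpoint records plus back-to-front run expansion; objective: alternative algorithm, same cost.


-- ===== PORT A =====
-- fused loop: state = (idx_lst, val_lst, mc), appended in order, reversed at the end
def build_d (arr : List (Int × Int)) : List Int × List Int :=
  let st := arr.foldl
    (fun (st : List Int × List Int × Int) p =>
      let mc := max st.2.2 p.2
      (st.1 ++ [p.1], st.2.1 ++ [-mc], mc))
    ([], [], 0)
  (st.1.reverse, st.2.1.reverse)

-- ===== PORT B =====
-- pass 1: record breakpoints (k, s) where the running max increases (state = records, m, k)
-- pass 2: expand the runs back-to-front (state = vals_rev, end), then pad the leading zeros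
def build_d_alt (arr : List (Int × Int)) : List Int × List Int :=
  let st := arr.foldl
    (fun (st : List (Nat × Int) × Int × Nat) p =>
      if p.2 > st.2.1 then (st.1 ++ [(st.2.2, p.2)], p.2, st.2.2 + 1)
      else (st.1, st.2.1, st.2.2 + 1))
    ([], 0, 0)
  let records := st.1
  let f := records.reverse.foldl
    (fun (st : List Int × Nat) r => (st.1 ++ List.replicate (st.2 - r.1) (-r.2), r.1))
    ([], arr.length)
  let vals_rev := f.1 ++ List.replicate f.2 (0 : Int)
  let idx_rev := (arr.map Prod.fst).reverse
  (idx_rev, vals_rev)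

-- ===== PRECONDITION & SPEC =====
def Spec_build_d (arr : List (Int × Int)) (out : List Int × List Int) : Prop := out = build_d_alt arr
instance (arr : List (Int × Int)) (out : List Int × List Int) : Decidable (Spec_build_d arr out) := by unfold Spec_build_d; infer_instance

-- ===== CLAIM (what is proved, stated in full; the proofs are below) =====
def Claim_equal_build_d : Prop := ∀ (arr : List (Int × Int)), Dom_build_d arr → Spec_build_d arr (build_d arr)

-- ===== LEMMAS AND PROOFS =====

-- reference prefix-max list and final max
def pvPref (vals : List Int) (m : Int) : List Int :=
  match vals with
  | [] => []
  | s :: t => let m' := max m s; m' :: pvPref t m'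

def pvLastM (vals : List Int) (m : Int) : Int :=
  match vals with
  | [] => m
  | s :: t => pvLastM t (max m s)

-- reference breakpoint list
def pvRecs (vals : List Int) (k : Nat) (m : Int) : List (Nat × Int) :=
  match vals with
  | [] => []
  | s :: t => if s > m then (k, s) :: pvRecs t (k + 1) s else pvRecs t (k + 1) m

theorem foldA_eq (l : List (Int × Int)) (a b : List Int) (m : Int) :
    l.foldl (fun (st : List Int × List Int × Int) p =>
      let mc := max st.2.2 p.2
      (st.1 ++ [p.1], st.2.1 ++ [-mc], mc)) (a, b, m)
    = (a ++ l.map Prod.fst, b ++ (pvPref (l.map Prod.snd) m).map (fun p => -p), pvLastM (l.map Prod.snd) m) := by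
  induction l generalizing a b m with
  | nil => simp [pvPref, pvLastM]
  | cons p t ih => simp [List.foldl, ih, pvPref, pvLastM]

theorem foldRecs_eq (l : List (Int × Int)) (a : List (Nat × Int)) (m : Int) (k : Nat) :
    l.foldl (fun (st : List (Nat × Int) × Int × Nat) p =>
      if p.2 > st.2.1 then (st.1 ++ [(st.2.2, p.2)], p.2, st.2.2 + 1)
      else (st.1, st.2.1, st.2.2 + 1)) (a, m, k)
    = (a ++ pvRecs (l.map Prod.snd) k m, pvLastM (l.map Prod.snd) m, k + l.length) := by
  induction l generalizing a m k with
  | nil => simp [pvRecs, pvLastM]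
  | cons p t ih =>
    by_cases h : p.2 > m
    · have hmax : max m p.2 = p.2 := by omega
      simp [List.foldl, h, ih, pvRecs, pvLastM, hmax]
      omega
    · have hmax : max m p.2 = m := by omega
      simp [List.foldl, h, ih, pvRecs, pvLastM, hmax]
      omega

theorem recs_mem_ge (l : List Int) (k : Nat) (m : Int) (p : Nat × Int)
    (hp : p ∈ pvRecs l k m) : k ≤ p.1 := by
  induction l generalizing k m with
  | nil => simp [pvRecs] at hp
  | cons s t ih =>
    unfold pvRecs at hp
    split at hp
    · rcases List.mem_cons.mp hp with h | h
      · subst h; exact le_refl _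
      · have := ih (k + 1) s h; omega
    · have := ih (k + 1) m hp; omega

-- the expansion step
def pvStepB : List Int × Nat → Nat × Int → List Int × Nat :=
  fun st r => (st.1 ++ List.replicate (st.2 - r.1) (-r.2), r.1)

-- the main invariant: expanding the records of l (from end = k + |l|) and padding
-- down to base k with -m yields the reversed, negated prefix-max list of l
theorem expand_eq (l : List Int) (k : Nat) (m : Int) :
    ((pvRecs l k m).reverse.foldl pvStepB ([], k + l.length)).1
      ++ List.replicate (((pvRecs l k m).reverse.foldl pvStepB ([], k + l.length)).2 - k) (-m)
    = ((pvPref l m).map (fun p => -p)).reverse := by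
  induction l generalizing k m with
  | nil => simp [pvRecs, pvPref]
  | cons s t ih =>
    have hsnd : ∀ (rs : List (Nat × Int)) (e : Nat),
        k + 1 ≤ e → (∀ p ∈ rs, k + 1 ≤ p.1) →
        k + 1 ≤ (rs.reverse.foldl pvStepB ([], e)).2 := by
      intro rs e he hmem
      cases rs with
      | nil => simpa using he
      | cons r rt =>
        have : (r :: rt).reverse.foldl pvStepB ([], e)
            = pvStepB (rt.reverse.foldl pvStepB ([], e)) r := by
          simp [List.foldl_append]
        rw [this]
        exact hmem r (List.mem_cons_self ..)
    by_cases h : s > m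
    · have hmax : max m s = s := by omega
      have hrecs : pvRecs (s :: t) k m = (k, s) :: pvRecs t (k + 1) s := by
        simp [pvRecs, h]
      set rs := pvRecs t (k + 1) s with hrs
      set f := rs.reverse.foldl pvStepB ([], (k + 1) + t.length) with hf
      have hlen : k + (s :: t).length = (k + 1) + t.length := by simp; omega
      have hfold : ((pvRecs (s :: t) k m).reverse.foldl pvStepB ([], k + (s :: t).length))
          = pvStepB f (k, s) := by
        rw [hrecs, hlen]
        simp [List.foldl_append, hf]
      have hge : k + 1 ≤ f.2 :=
        hsnd rs ((k + 1) + t.length) (by omega)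
          (fun p hp => recs_mem_ge t (k + 1) s p (by rw [hrs] at hp; exact hp))
      have hsplit : List.replicate (f.2 - k) (-s) = List.replicate (f.2 - (k + 1)) (-s) ++ [-s] := by
        have : f.2 - k = (f.2 - (k + 1)) + 1 := by omega
        rw [this, List.replicate_succ']
      rw [hfold]
      show (f.1 ++ List.replicate (f.2 - k) (-s)) ++ List.replicate (k - k) (-m) = _
      rw [hsplit]
      have ihx := ih (k + 1) s
      rw [← hrs, ← hf] at ihx
      simp only [Nat.sub_self, List.replicate_zero, List.append_nil, ← List.append_assoc, ihx]
      simp [pvPref, hmax]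
    · have hmax : max m s = m := by omega
      have hrecs : pvRecs (s :: t) k m = pvRecs t (k + 1) m := by
        simp [pvRecs, h]
      set rs := pvRecs t (k + 1) m with hrs
      set f := rs.reverse.foldl pvStepB ([], (k + 1) + t.length) with hf
      have hlen : k + (s :: t).length = (k + 1) + t.length := by simp; omega
      have hge : k + 1 ≤ f.2 :=
        hsnd rs ((k + 1) + t.length) (by omega)
          (fun p hp => recs_mem_ge t (k + 1) m p (by rw [hrs] at hp; exact hp))
      have hsplit : List.replicate (f.2 - k) (-m) = List.replicate (f.2 - (k + 1)) (-m) ++ [-m] := by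
        have : f.2 - k = (f.2 - (k + 1)) + 1 := by omega
        rw [this, List.replicate_succ']
      rw [hrecs, hlen, ← hf, hsplit]
      have ihx := ih (k + 1) m
      rw [← hrs, ← hf] at ihx
      rw [← List.append_assoc, ihx]
      simp [pvPref, hmax]

-- ===== VERDICT (by name: the statement is the Claim_ definition above) =====
theorem build_d_spec : Claim_equal_build_d := by
  intro arr _
  unfold Spec_build_d build_d build_d_alt
  simp only [foldA_eq, foldRecs_eq, List.nil_append]
  have h := expand_eq (arr.map Prod.snd) 0 0
  simp only [Nat.zero_add, Nat.sub_zero, neg_zero, List.length_map] at h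
  have hstep : (fun (st : List Int × Nat) (r : Nat × Int) =>
      (st.1 ++ List.replicate (st.2 - r.1) (-r.2), r.1)) = pvStepB := rfl
  rw [hstep]
  exact Prod.ext rfl (by rw [h])
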